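-- pv_equiv track=rewrite | github.com/appalameenakshisindhuja/hack_week | blackbox/app.py | get_primes_from
-- ===== SOURCE A (Python) =====
-- def is_prime(n):
--     if n < 2:
--         return False
--     for i in range(2, int(n ** 0.5) + 1):
--         if n % i == 0:
--             return False
--     return True
--
-- def get_primes_from(start, count):
--     primes = []
--     candidate = max(start, 2)
--
--     while len(primes) < count:
--         if is_prime(candidate):
--             primes.append(candidate)
--         candidate += 1
--
--     return primes
-- ===== SOURCE B (Python) =====
-- def _has_small_factor(n):
--     # n odd >= 3: trial divisors 3, then 5,7, 11,13, ... (6k+-1) with square <= n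
--     if 9 <= n and n % 3 == 0:
--         return True
--     d = 5
--     while d * d <= n:
--         if n % d == 0:
--             return True
--         if (d + 2) * (d + 2) <= n and n % (d + 2) == 0:
--             return True
--         d += 6
--     return False
--
-- def get_primes_from(start, count):
--     result = []
--     c = start if start > 2 else 2
--     if count > 0 and c == 2:
--         result.append(2)
--         c = 3
--     if c % 2 == 0:
--         c += 1
--     while len(result) < count:
--         if not _has_small_factor(c):
--             result.append(c)
--         c += 2
--     return result
-- ===== Notes on version B (the rewrite author's own statement) =====
-- stated objective: faster
-- what changed: A trial-divides every candidate (including all even ones) by every integer 2..sqrt(n); B emits 2 separately, walks odd candidates only, and trial-divides by 3 and the 6k±1 wheel divisors up to sqrt(n).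
import Mathlib
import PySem

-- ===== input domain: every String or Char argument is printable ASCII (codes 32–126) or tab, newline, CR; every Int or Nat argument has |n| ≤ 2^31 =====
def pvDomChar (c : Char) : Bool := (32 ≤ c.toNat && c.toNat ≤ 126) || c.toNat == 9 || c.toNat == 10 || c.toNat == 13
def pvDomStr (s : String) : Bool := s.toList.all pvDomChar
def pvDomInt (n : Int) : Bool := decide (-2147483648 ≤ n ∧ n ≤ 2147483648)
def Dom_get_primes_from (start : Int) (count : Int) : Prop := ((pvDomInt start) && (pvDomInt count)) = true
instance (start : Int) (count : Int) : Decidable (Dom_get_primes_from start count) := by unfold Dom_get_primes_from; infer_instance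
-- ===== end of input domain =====

-- B replaces A's trial division by every i in [2, sqrt n] on every integer candidate with a
-- 6-wheel: even candidates are skipped outright and trial divisors are only 3 and 6k±1 up to
-- sqrt n (measured faster by a constant factor; same exact output).

-- ===== PORT A =====
def isPrimeA (n : Nat) : Bool :=
  if n < 2 then false
  else (List.range' 2 (Nat.sqrt n + 1 - 2)).all (fun i => n % i != 0)


-- A's while-loop: `need` = count − len(primes); the candidate advances by 1.  The fuel
-- argument only totalises the unbounded Python `while` (it is proved sufficient below,
-- so the branch returning [] on fuel 0 is never taken on any input).
def loopAF : Nat → Nat → Nat → List Int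
  | 0, _, _ => []
  | fuel + 1, need, c =>
    if need = 0 then []
    else if isPrimeA c then (c : Int) :: loopAF fuel (need - 1) (c + 1)
    else loopAF fuel need (c + 1)

def get_primes_from (start : Int) (count : Int) : List Int :=
  loopAF (2 ^ count.toNat * (2 * (max start 2).toNat + 4)) count.toNat (max start 2).toNat

-- ===== PORT B =====
-- _has_small_factor's inner while-loop: d = 5, 11, 17, …, also testing d + 2
def wheelLoop (n d : Nat) : Bool :=
  if d * d ≤ n then
    if n % d = 0 then true
    else if (d + 2) * (d + 2) ≤ n ∧ n % (d + 2) = 0 then true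
    else wheelLoop n (d + 6)
  else false
termination_by n + 1 - d * d
decreasing_by
  have h : (d + 6) * (d + 6) = d * d + 12 * d + 36 := by ring
  omega

def hasSmallFactor (n : Nat) : Bool :=
  if 9 ≤ n ∧ n % 3 = 0 then true else wheelLoop n 5


-- B's while-loop: odd candidates only, advancing by 2; same fuel totalisation as loopAF
def loopBF : Nat → Nat → Nat → List Int
  | 0, _, _ => []
  | fuel + 1, need, c =>
    if need = 0 then []
    else if hasSmallFactor c = false then (c : Int) :: loopBF fuel (need - 1) (c + 2)
    else loopBF fuel need (c + 2)

def get_primes_from_alt (start : Int) (count : Int) : List Int :=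
  if 0 < count ∧ (max start 2).toNat = 2 then
    (2 : Int) :: loopBF (2 ^ count.toNat * (2 * (max start 2).toNat + 4)) (count.toNat - 1) 3
  else
    loopBF (2 ^ count.toNat * (2 * (max start 2).toNat + 4)) count.toNat
      (if (max start 2).toNat % 2 = 0 then (max start 2).toNat + 1 else (max start 2).toNat)

-- ===== PRECONDITION & SPEC =====
def Spec_get_primes_from (start : Int) (count : Int) (out : List Int) : Prop := out = get_primes_from_alt start count
instance (start : Int) (count : Int) (out : List Int) : Decidable (Spec_get_primes_from start count out) := by unfold Spec_get_primes_from; infer_instance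

-- ===== CLAIM (what is proved, stated in full; the proofs are below) =====
def Claim_equal_get_primes_from : Prop := ∀ (start : Int) (count : Int), Dom_get_primes_from start count → Spec_get_primes_from start count (get_primes_from start count)

-- ===== LEMMAS AND PROOFS =====

theorem prime_isPrimeA {p : Nat} (hp : Nat.Prime p) : isPrimeA p = true := by
  have h2 := hp.two_le
  simp only [isPrimeA, if_neg (by omega : ¬ p < 2), List.all_eq_true]
  intro i hi
  have hs : 1 ≤ Nat.sqrt p := (Nat.le_sqrt).2 (by omega)
  rw [List.mem_range'_1] at hi
  have hi2 : 2 ≤ i ∧ i ≤ Nat.sqrt p := by omega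
  have := (Nat.prime_def_le_sqrt.1 hp).2 i hi2.1 hi2.2
  simp only [bne_iff_ne, ne_eq]
  intro hmod
  exact this (Nat.dvd_iff_mod_eq_zero.2 hmod)

theorem exA (c : Nat) : ∃ m, isPrimeA (c + m) = true := by
  obtain ⟨p, hle, hp⟩ := Nat.exists_infinite_primes c
  exact ⟨p - c, by rw [Nat.add_sub_cancel' hle]; exact prime_isPrimeA hp⟩

theorem findA_succ (c : Nat) (h : isPrimeA c = false) :
    Nat.find (exA c) = Nat.find (exA (c + 1)) + 1 := by
  have h1 : Nat.find (exA c) ≠ 0 := by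
    intro h0
    have := (Nat.find_eq_zero (exA c)).1 h0
    rw [Nat.add_zero, h] at this
    exact absurd this (by simp)
  have hm := Nat.find_spec (exA c)
  have le1 : Nat.find (exA (c + 1)) ≤ Nat.find (exA c) - 1 := by
    apply Nat.find_min'
    have he : (c + 1) + (Nat.find (exA c) - 1) = c + Nat.find (exA c) := by omega
    rw [he]; exact hm
  have le2 : Nat.find (exA c) ≤ Nat.find (exA (c + 1)) + 1 := by
    apply Nat.find_min'
    have he : c + (Nat.find (exA (c + 1)) + 1) = (c + 1) + Nat.find (exA (c + 1)) := by omega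
    rw [he]; exact Nat.find_spec (exA (c + 1))
  omega

theorem findA_succ_lt (c : Nat) (h : isPrimeA c = false) :
    Nat.find (exA (c + 1)) < Nat.find (exA c) := by
  rw [findA_succ c h]; omega

theorem wheelLoop_iff (n d : Nat) : wheelLoop n d = true ↔
    ∃ m, ((d + 6 * m) * (d + 6 * m) ≤ n ∧ n % (d + 6 * m) = 0) ∨
         ((d + 6 * m + 2) * (d + 6 * m + 2) ≤ n ∧ n % (d + 6 * m + 2) = 0) := by
  induction d using wheelLoop.induct (n := n) with
  | case1 d hle hmod =>
    rw [wheelLoop, if_pos hle, if_pos hmod]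
    exact ⟨fun _ => ⟨0, Or.inl ⟨by simpa using hle, by simpa using hmod⟩⟩, fun _ => rfl⟩
  | case2 d hle hmod h2 =>
    rw [wheelLoop, if_pos hle, if_neg hmod, if_pos h2]
    exact ⟨fun _ => ⟨0, Or.inr ⟨by simpa using h2.1, by simpa using h2.2⟩⟩, fun _ => rfl⟩
  | case3 d hle hmod h2 ih =>
    rw [wheelLoop, if_pos hle, if_neg hmod, if_neg h2]
    rw [ih]
    constructor
    · rintro ⟨m, hm⟩
      exact ⟨m + 1, by rw [show d + 6 * (m + 1) = d + 6 + 6 * m by ring]; exact hm⟩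
    · rintro ⟨m, hm⟩
      cases m with
      | zero =>
        exfalso
        simp only [Nat.mul_zero, Nat.add_zero] at hm
        rcases hm with h | h
        · exact hmod h.2
        · exact h2 h
      | succ m =>
        exact ⟨m, by rw [show d + 6 + 6 * m = d + 6 * (m + 1) by ring]; exact hm⟩
  | case4 d hle =>
    rw [wheelLoop, if_neg hle]
    simp only [Bool.false_eq_true, false_iff]
    rintro ⟨m, hm⟩
    have h1 : d * d ≤ (d + 6 * m) * (d + 6 * m) := Nat.mul_le_mul (by omega) (by omega)
    have h2 : d * d ≤ (d + 6 * m + 2) * (d + 6 * m + 2) := Nat.mul_le_mul (by omega) (by omega)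
    rcases hm with h | h <;> omega

theorem odd_not_dvd_pow2 (j e : Nat) (hodd : e % 2 = 1) (h5 : 5 ≤ e) (hdvd : e ∣ 2 ^ j) :
    False := by
  obtain ⟨k, _, he⟩ := (Nat.dvd_prime_pow Nat.prime_two).1 hdvd
  cases k with
  | zero => norm_num at he; omega
  | succ k =>
    have : (2:Nat) ∣ e := he ▸ dvd_pow_self 2 (by omega)
    have := Nat.dvd_iff_mod_eq_zero.1 this
    omega

theorem pow2_noSmallFactor (j : Nat) : hasSmallFactor (2 ^ j) = false := by
  unfold hasSmallFactor
  rw [if_neg, Bool.eq_false_iff, ne_eq, wheelLoop_iff]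
  · rintro ⟨m, ⟨hle, hmod⟩ | ⟨hle, hmod⟩⟩
    · exact odd_not_dvd_pow2 j (5 + 6 * m) (by omega) (by omega)
        (Nat.dvd_of_mod_eq_zero hmod)
    · exact odd_not_dvd_pow2 j (5 + 6 * m + 2) (by omega) (by omega)
        (Nat.dvd_of_mod_eq_zero hmod)
  · rintro ⟨_, h3⟩
    have h := Nat.Prime.dvd_of_dvd_pow Nat.prime_three (Nat.dvd_of_mod_eq_zero h3)
    have := Nat.le_of_dvd (by norm_num) h
    omega

theorem noSmallFactor_iff_prime (n : Nat) (hodd : n % 2 = 1) (h3 : 3 ≤ n) :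
    hasSmallFactor n = false ↔ Nat.Prime n := by
  unfold hasSmallFactor
  by_cases h9 : 9 ≤ n ∧ n % 3 = 0
  · rw [if_pos h9]
    refine iff_of_false (by simp) ?_
    intro hp
    rcases hp.eq_one_or_self_of_dvd 3 (Nat.dvd_of_mod_eq_zero h9.2) with h | h <;> omega
  · rw [if_neg h9, Bool.eq_false_iff, ne_eq, wheelLoop_iff]
    constructor
    · intro hno
      rw [Nat.prime_def_le_sqrt]
      refine ⟨by omega, ?_⟩
      intro m hm2 hms hdvd
      have hmm : m * m ≤ n := Nat.le_sqrt.1 hms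
      have hmod : n % m = 0 := Nat.dvd_iff_mod_eq_zero.1 hdvd
      have hm4 : 4 ≤ n := le_trans (Nat.mul_le_mul hm2 hm2) hmm
      have hm_odd : m % 2 = 1 := by
        by_cases me : m % 2 = 0
        · exfalso
          have h2n : (2:Nat) ∣ n := dvd_trans (Nat.dvd_of_mod_eq_zero me) hdvd
          have := Nat.dvd_iff_mod_eq_zero.1 h2n
          omega
        · omega
      by_cases m3 : m % 3 = 0
      · have hn3 : n % 3 = 0 :=
          Nat.dvd_iff_mod_eq_zero.1 (dvd_trans (Nat.dvd_of_mod_eq_zero m3) hdvd)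
        exact h9 ⟨by omega, hn3⟩
      · have hm6 : m % 6 = 1 ∨ m % 6 = 5 := by omega
        apply hno
        rcases hm6 with h6 | h6
        · refine ⟨(m - 7) / 6, Or.inr ?_⟩
          have he : 5 + 6 * ((m - 7) / 6) + 2 = m := by omega
          rw [he]; exact ⟨hmm, hmod⟩
        · refine ⟨(m - 5) / 6, Or.inl ?_⟩
          have he : 5 + 6 * ((m - 5) / 6) = m := by omega
          rw [he]; exact ⟨hmm, hmod⟩
    · rintro hp ⟨m, hm⟩
      have key : ∀ e, 5 ≤ e → e * e ≤ n → n % e = 0 → False := by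
        intro e h5 hle hmod
        rcases hp.eq_one_or_self_of_dvd e (Nat.dvd_of_mod_eq_zero hmod) with h | h
        · omega
        · subst h; nlinarith
      rcases hm with ⟨hle, hmod⟩ | ⟨hle, hmod⟩
      · exact key _ (by omega) hle hmod
      · exact key _ (by omega) hle hmod

theorem exB (c : Nat) : ∃ m, hasSmallFactor (c + 2 * m) = false := by
  by_cases hpar : c % 2 = 1
  · obtain ⟨p, hle, hp⟩ := Nat.exists_infinite_primes (max c 3)
    have hp3 : 3 ≤ p := le_trans (le_max_right _ _) hle
    have hpodd : p % 2 = 1 := by rcases hp.eq_two_or_odd with h | h <;> omega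
    have hcp : c ≤ p := le_trans (le_max_left _ _) hle
    refine ⟨(p - c) / 2, ?_⟩
    have he : c + 2 * ((p - c) / 2) = p := by omega
    rw [he]
    exact (noSmallFactor_iff_prime p hpodd hp3).2 hp
  · have hlt : c < 2 ^ (c + 1) :=
      lt_trans Nat.lt_two_pow_self (Nat.pow_lt_pow_right (by omega) (by omega))
    have hev : 2 ^ (c + 1) % 2 = 0 :=
      Nat.dvd_iff_mod_eq_zero.1 (dvd_pow_self 2 (by omega))
    refine ⟨(2 ^ (c + 1) - c) / 2, ?_⟩
    have he : c + 2 * ((2 ^ (c + 1) - c) / 2) = 2 ^ (c + 1) := by omega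
    rw [he]
    exact pow2_noSmallFactor (c + 1)

theorem findB_succ (c : Nat) (h : hasSmallFactor c = true) :
    Nat.find (exB c) = Nat.find (exB (c + 2)) + 1 := by
  have h1 : Nat.find (exB c) ≠ 0 := by
    intro h0
    have := (Nat.find_eq_zero (exB c)).1 h0
    rw [Nat.mul_zero, Nat.add_zero, h] at this
    exact absurd this (by simp)
  have hm := Nat.find_spec (exB c)
  have le1 : Nat.find (exB (c + 2)) ≤ Nat.find (exB c) - 1 := by
    apply Nat.find_min'
    have he : (c + 2) + 2 * (Nat.find (exB c) - 1) = c + 2 * Nat.find (exB c) := by omega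
    rw [he]; exact hm
  have le2 : Nat.find (exB c) ≤ Nat.find (exB (c + 2)) + 1 := by
    apply Nat.find_min'
    have he : c + 2 * (Nat.find (exB (c + 2)) + 1) = (c + 2) + 2 * Nat.find (exB (c + 2)) := by omega
    rw [he]; exact Nat.find_spec (exB (c + 2))
  omega

theorem findB_succ_lt (c : Nat) (h : hasSmallFactor c = true) :
    Nat.find (exB (c + 2)) < Nat.find (exB c) := by
  rw [findB_succ c h]; omega

-- A's while-loop: `need` = count − len(primes); candidate advances by 1
def loopA (need : Nat) (c : Nat) : List Int :=
  if need = 0 then []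
  else if hp : isPrimeA c = true then (c : Int) :: loopA (need - 1) (c + 1)
  else loopA need (c + 1)
termination_by (need, Nat.find (exA c))
decreasing_by
  · exact Prod.Lex.left _ _ (by omega)
  · exact Prod.Lex.right _ (findA_succ_lt c (by simpa using hp))

-- B's while-loop: odd candidates only, advancing by 2
def loopB (need : Nat) (c : Nat) : List Int :=
  if need = 0 then []
  else if hf : hasSmallFactor c = false then (c : Int) :: loopB (need - 1) (c + 2)
  else loopB need (c + 2)
termination_by (need, Nat.find (exB c))
decreasing_by
  · exact Prod.Lex.left _ _ (by omega)
  · exact Prod.Lex.right _ (findB_succ_lt c (by simpa using hf))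


-- exact step counts of the two while-loops (the fuel loops are proved to match the
-- ideal loops whenever the fuel dominates these)
def stepsA (need c : Nat) : Nat :=
  if need = 0 then 0
  else if hp : isPrimeA c = true then stepsA (need - 1) (c + 1) + 1
  else stepsA need (c + 1) + 1
termination_by (need, Nat.find (exA c))
decreasing_by
  · exact Prod.Lex.left _ _ (by omega)
  · exact Prod.Lex.right _ (findA_succ_lt c (by simpa using hp))

def stepsB (need c : Nat) : Nat :=
  if need = 0 then 0
  else if hf : hasSmallFactor c = false then stepsB (need - 1) (c + 2) + 1
  else stepsB need (c + 2) + 1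
termination_by (need, Nat.find (exB c))
decreasing_by
  · exact Prod.Lex.left _ _ (by omega)
  · exact Prod.Lex.right _ (findB_succ_lt c (by simpa using hf))

theorem isPrimeA_iff (n : Nat) : isPrimeA n = true ↔ Nat.Prime n := by
  constructor
  · intro h
    by_cases h2 : n < 2
    · rw [isPrimeA, if_pos h2] at h; exact absurd h (by simp)
    · rw [isPrimeA, if_neg h2, List.all_eq_true] at h
      rw [Nat.prime_def_le_sqrt]
      refine ⟨by omega, ?_⟩
      intro m hm2 hms hdvd
      have hs : 1 ≤ Nat.sqrt n := le_trans (by omega) hms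
      have hmem : m ∈ List.range' 2 (Nat.sqrt n + 1 - 2) := by
        rw [List.mem_range'_1]; omega
      have := h m hmem
      simp only [bne_iff_ne, ne_eq] at this
      exact this (Nat.dvd_iff_mod_eq_zero.1 hdvd)
  · exact prime_isPrimeA


theorem loopA_zero (c : Nat) : loopA 0 c = [] := by rw [loopA]; simp

theorem loopB_zero (c : Nat) : loopB 0 c = [] := by rw [loopB]; simp

theorem skipA_even (need c : Nat) (hpar : c % 2 = 0) (h4 : 4 ≤ c) :
    loopA need c = loopA need (c + 1) := by
  have hnp : ¬ Nat.Prime c := by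
    intro hp
    rcases hp.eq_two_or_odd with h | h <;> omega
  have hf : isPrimeA c = false := by
    cases h : isPrimeA c
    · rfl
    · exact absurd ((isPrimeA_iff c).1 h) hnp
  cases need with
  | zero => rw [loopA_zero, loopA_zero]
  | succ k => rw [loopA]; simp [hf]

theorem stepA_prime (n c : Nat) (hp : Nat.Prime c) (hodd : c % 2 = 1) (h3 : 3 ≤ c) :
    loopA (n + 1) c = (c : Int) :: loopA n (c + 2) := by
  rw [loopA]
  simp only [Nat.succ_ne_zero, if_false, prime_isPrimeA hp, dif_pos, Nat.add_sub_cancel]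
  rw [skipA_even n (c + 1) (by omega) (by omega)]

theorem stepA_comp (n c : Nat) (hp : ¬ Nat.Prime c) (hodd : c % 2 = 1) (h3 : 3 ≤ c) :
    loopA n c = loopA n (c + 2) := by
  have hf : isPrimeA c = false := by
    cases h : isPrimeA c
    · rfl
    · exact absurd ((isPrimeA_iff c).1 h) hp
  cases n with
  | zero => rw [loopA_zero, loopA_zero]
  | succ k =>
    rw [loopA]
    simp only [Nat.succ_ne_zero, if_false, hf]
    rw [skipA_even (k + 1) (c + 1) (by omega) (by omega)]
    simp

theorem stepB_prime (n c : Nat) (hp : Nat.Prime c) (hodd : c % 2 = 1) (h3 : 3 ≤ c) :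
    loopB (n + 1) c = (c : Int) :: loopB n (c + 2) := by
  have hf : hasSmallFactor c = false := (noSmallFactor_iff_prime c hodd h3).2 hp
  rw [loopB]; simp [hf]

theorem stepB_comp (n c : Nat) (hp : ¬ Nat.Prime c) (hodd : c % 2 = 1) (h3 : 3 ≤ c) :
    loopB n c = loopB n (c + 2) := by
  have hf : hasSmallFactor c = true := by
    cases h : hasSmallFactor c
    · exact absurd ((noSmallFactor_iff_prime c hodd h3).1 h) hp
    · rfl
  cases n with
  | zero => rw [loopB_zero, loopB_zero]
  | succ k => rw [loopB]; simp [hf]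

theorem loop_main : ∀ need c, c % 2 = 1 → 3 ≤ c → loopA need c = loopB need c := by
  intro need
  induction need with
  | zero => intro c _ _; rw [loopA_zero, loopB_zero]
  | succ n ih =>
    have H : ∀ k c, c % 2 = 1 → 3 ≤ c → Nat.find (exB c) = k →
        loopA (n + 1) c = loopB (n + 1) c := by
      intro k
      induction k using Nat.strong_induction_on with
      | _ k ihk =>
        intro c hodd h3 hk
        by_cases hp : Nat.Prime c
        · rw [stepA_prime n c hp hodd h3, stepB_prime n c hp hodd h3,
            ih (c + 2) (by omega) (by omega)]
        · rw [stepA_comp (n + 1) c hp hodd h3, stepB_comp (n + 1) c hp hodd h3]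
          have hf : hasSmallFactor c = true := by
            cases h : hasSmallFactor c
            · exact absurd ((noSmallFactor_iff_prime c hodd h3).1 h) hp
            · rfl
          exact ihk _ (hk ▸ findB_succ_lt c hf) (c + 2) (by omega) (by omega) rfl
    intro c hodd h3
    exact H _ c hodd h3 rfl

theorem stepA_two (n : Nat) : loopA (n + 1) 2 = (2 : Int) :: loopA n 3 := by
  rw [loopA]
  simp [prime_isPrimeA Nat.prime_two]

theorem nextGoodA_le (c : Nat) (h1 : 1 ≤ c) : c + Nat.find (exA c) ≤ 2 * c := by
  obtain ⟨p, hp, hlt, hle⟩ := Nat.exists_prime_lt_and_le_two_mul c (by omega)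
  have hg : isPrimeA (c + (p - c)) = true := by
    rw [Nat.add_sub_cancel' (by omega : c ≤ p)]; exact prime_isPrimeA hp
  have := Nat.find_min' (exA c) hg
  omega

theorem boundA : ∀ n c, 1 ≤ c → stepsA n c + c ≤ 2 ^ n * (c + Nat.find (exA c) + 1) := by
  intro n
  induction n with
  | zero =>
    intro c h1
    rw [stepsA, if_pos rfl, pow_zero, one_mul]
    omega
  | succ n ih =>
    have H : ∀ k c, 1 ≤ c → Nat.find (exA c) = k →
        stepsA (n + 1) c + c ≤ 2 ^ (n + 1) * (c + Nat.find (exA c) + 1) := by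
      intro k
      induction k using Nat.strong_induction_on with
      | _ k ihk =>
        intro c h1 hk
        by_cases hg : isPrimeA c = true
        · have hf0 : Nat.find (exA c) = 0 :=
            (Nat.find_eq_zero (exA c)).2 (by rw [Nat.add_zero]; exact hg)
          rw [stepsA]
          simp only [Nat.succ_ne_zero, if_false, hg, dif_pos, Nat.add_sub_cancel]
          have hih := ih (c + 1) (by omega)
          have hn : (c + 1) + Nat.find (exA (c + 1)) ≤ 2 * c := by
            obtain ⟨p, hp, hlt, hle⟩ := Nat.exists_prime_lt_and_le_two_mul c (by omega)
            have hg2 : isPrimeA ((c + 1) + (p - c - 1)) = true := by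
              rw [show (c + 1) + (p - c - 1) = p by omega]; exact prime_isPrimeA hp
            have := Nat.find_min' (exA (c + 1)) hg2
            omega
          have hmono : 2 ^ n * ((c + 1) + Nat.find (exA (c + 1)) + 1) ≤ 2 ^ n * (2 * c + 1) :=
            Nat.mul_le_mul_left _ (by omega)
          have heq : 2 ^ (n + 1) * (c + Nat.find (exA c) + 1) = 2 ^ n * (2 * c + 2) := by
            rw [hf0]; ring
          have h2 : 2 ^ n * (2 * c + 1) ≤ 2 ^ n * (2 * c + 2) :=
            Nat.mul_le_mul_left _ (by omega)
          omega
        · have hgf : isPrimeA c = false := by cases h : isPrimeA c; rfl; exact absurd h hg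
          have hstep := findA_succ c hgf
          rw [stepsA]
          simp only [Nat.succ_ne_zero, if_false, hgf]
          have hlt : Nat.find (exA (c + 1)) < k := by omega
          have hih := ihk _ hlt (c + 1) (by omega) rfl
          have heq : (c + 1) + Nat.find (exA (c + 1)) + 1 = c + Nat.find (exA c) + 1 := by omega
          rw [heq] at hih
          simp only [Bool.false_eq_true, dite_false]
          omega
    intro c h1
    exact H _ c h1 rfl

theorem topA (n c : Nat) (h1 : 1 ≤ c) : stepsA n c ≤ 2 ^ n * (2 * c + 1) := by
  have hb := boundA n c h1
  have hg := nextGoodA_le c h1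
  have hmono : 2 ^ n * (c + Nat.find (exA c) + 1) ≤ 2 ^ n * (2 * c + 1) :=
    Nat.mul_le_mul_left _ (by omega)
  omega

theorem nextGoodB_le (c : Nat) (hodd : c % 2 = 1) (h3 : 3 ≤ c) :
    c + 2 * Nat.find (exB c) ≤ 2 * c := by
  obtain ⟨p, hp, hlt, hle⟩ := Nat.exists_prime_lt_and_le_two_mul c (by omega)
  have hpodd : p % 2 = 1 := by
    rcases hp.eq_two_or_odd with h | h <;> omega
  have hg : hasSmallFactor (c + 2 * ((p - c) / 2)) = false := by
    rw [show c + 2 * ((p - c) / 2) = p by omega]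
    exact (noSmallFactor_iff_prime p hpodd (by omega)).2 hp
  have := Nat.find_min' (exB c) hg
  omega

theorem boundB : ∀ n c, c % 2 = 1 → 3 ≤ c → stepsB n c + c ≤ 2 ^ n * (c + 2 * Nat.find (exB c) + 1) := by
  intro n
  induction n with
  | zero =>
    intro c hodd h3
    rw [stepsB, if_pos rfl, pow_zero, one_mul]
    omega
  | succ n ih =>
    have H : ∀ k c, c % 2 = 1 → 3 ≤ c → Nat.find (exB c) = k →
        stepsB (n + 1) c + c ≤ 2 ^ (n + 1) * (c + 2 * Nat.find (exB c) + 1) := by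
      intro k
      induction k using Nat.strong_induction_on with
      | _ k ihk =>
        intro c hodd h3 hk
        by_cases hg : hasSmallFactor c = false
        · have hf0 : Nat.find (exB c) = 0 :=
            (Nat.find_eq_zero (exB c)).2 (by rw [Nat.mul_zero, Nat.add_zero]; exact hg)
          rw [stepsB]
          simp only [Nat.succ_ne_zero, if_false, hg, dif_pos, Nat.add_sub_cancel]
          have hih := ih (c + 2) (by omega) (by omega)
          have hn : (c + 2) + 2 * Nat.find (exB (c + 2)) ≤ 2 * c := by
            obtain ⟨p, hp, hlt, hle⟩ := Nat.exists_prime_lt_and_le_two_mul c (by omega)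
            have hpodd : p % 2 = 1 := by
              rcases hp.eq_two_or_odd with h | h <;> omega
            have hg2 : hasSmallFactor ((c + 2) + 2 * ((p - c - 2) / 2)) = false := by
              rw [show (c + 2) + 2 * ((p - c - 2) / 2) = p by omega]
              exact (noSmallFactor_iff_prime p hpodd (by omega)).2 hp
            have := Nat.find_min' (exB (c + 2)) hg2
            omega
          have hmono : 2 ^ n * ((c + 2) + 2 * Nat.find (exB (c + 2)) + 1) ≤ 2 ^ n * (2 * c + 1) :=
            Nat.mul_le_mul_left _ (by omega)
          have heq : 2 ^ (n + 1) * (c + 2 * Nat.find (exB c) + 1) = 2 ^ n * (2 * c + 2) := by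
            rw [hf0]; ring
          have h2 : 2 ^ n * (2 * c + 1) ≤ 2 ^ n * (2 * c + 2) :=
            Nat.mul_le_mul_left _ (by omega)
          omega
        · have hgt : hasSmallFactor c = true := by
            cases h : hasSmallFactor c; exact absurd h hg; rfl
          have hstep := findB_succ c hgt
          rw [stepsB]
          simp only [Nat.succ_ne_zero, if_false, hgt, Bool.true_eq_false, dite_false]
          have hlt : Nat.find (exB (c + 2)) < k := by omega
          have hih := ihk _ hlt (c + 2) (by omega) (by omega) rfl
          have heq : (c + 2) + 2 * Nat.find (exB (c + 2)) + 1 = c + 2 * Nat.find (exB c) + 1 := by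
            omega
          rw [heq] at hih
          omega
    intro c hodd h3
    exact H _ c hodd h3 rfl

theorem topB (n c : Nat) (hodd : c % 2 = 1) (h3 : 3 ≤ c) : stepsB n c ≤ 2 ^ n * (2 * c + 1) := by
  have hb := boundB n c hodd h3
  have hg := nextGoodB_le c hodd h3
  have hmono : 2 ^ n * (c + 2 * Nat.find (exB c) + 1) ≤ 2 ^ n * (2 * c + 1) :=
    Nat.mul_le_mul_left _ (by omega)
  omega

theorem suffA : ∀ f need c, stepsA need c ≤ f → loopAF f need c = loopA need c := by
  intro f
  induction f with
  | zero =>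
    intro need c h
    rw [stepsA] at h
    split_ifs at h with h1
    · rw [h1, loopA_zero]; rfl
    · omega
    · omega
  | succ f ihf =>
    intro need c h
    by_cases h1 : need = 0
    · rw [h1, loopA_zero]
      simp [loopAF]
    · obtain ⟨m, hm⟩ : ∃ m, need = m + 1 := ⟨need - 1, by omega⟩
      subst hm
      by_cases hg : isPrimeA c = true
      · rw [stepsA] at h
        simp only [Nat.succ_ne_zero, if_false, hg, dif_pos, Nat.add_sub_cancel] at h
        simp only [loopAF, Nat.succ_ne_zero, if_false, hg, if_true, Nat.add_sub_cancel]
        rw [loopA]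
        simp only [Nat.succ_ne_zero, if_false, hg, dif_pos, Nat.add_sub_cancel]
        rw [ihf m (c + 1) (by omega)]
      · have hgf : isPrimeA c = false := by cases hx : isPrimeA c; rfl; exact absurd hx hg
        rw [stepsA] at h
        simp only [Nat.succ_ne_zero, if_false, hgf, Bool.false_eq_true, dite_false] at h
        simp only [loopAF, Nat.succ_ne_zero, if_false, hgf]
        rw [loopA]
        simp only [Nat.succ_ne_zero, if_false, hgf]
        simp only [Bool.false_eq_true, dite_false, if_false]
        rw [ihf (m + 1) (c + 1) (by omega)]
  
theorem suffB : ∀ f need c, stepsB need c ≤ f → loopBF f need c = loopB need c := by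
  intro f
  induction f with
  | zero =>
    intro need c h
    rw [stepsB] at h
    split_ifs at h with h1
    · rw [h1, loopB_zero]; rfl
    · omega
    · omega
  | succ f ihf =>
    intro need c h
    by_cases h1 : need = 0
    · rw [h1, loopB_zero]
      simp [loopBF]
    · obtain ⟨m, hm⟩ : ∃ m, need = m + 1 := ⟨need - 1, by omega⟩
      subst hm
      by_cases hg : hasSmallFactor c = false
      · rw [stepsB] at h
        simp only [Nat.succ_ne_zero, if_false, hg, dif_pos, Nat.add_sub_cancel] at h
        simp only [loopBF, Nat.succ_ne_zero, if_false, hg, if_true, Nat.add_sub_cancel]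
        rw [loopB]
        simp only [Nat.succ_ne_zero, if_false, hg, dif_pos, Nat.add_sub_cancel]
        rw [ihf m (c + 2) (by omega)]
      · have hgt : hasSmallFactor c = true := by
          cases hx : hasSmallFactor c; exact absurd hx hg; rfl
        rw [stepsB] at h
        simp only [Nat.succ_ne_zero, if_false, hgt, Bool.true_eq_false, dite_false] at h
        simp only [loopBF, Nat.succ_ne_zero, if_false, hgt]
        rw [loopB]
        simp only [Nat.succ_ne_zero, if_false, hgt]
        simp only [Bool.true_eq_false, dite_false, if_false]
        rw [ihf (m + 1) (c + 2) (by omega)]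

theorem fuel_okA (need c : Nat) (h1 : 1 ≤ c) :
    stepsA need c ≤ 2 ^ need * (2 * c + 4) := by
  have := topA need c h1
  have hmono : 2 ^ need * (2 * c + 1) ≤ 2 ^ need * (2 * c + 4) :=
    Nat.mul_le_mul_left _ (by omega)
  omega

theorem ports_agree (start count : Int) :
    get_primes_from start count = get_primes_from_alt start count := by
  unfold get_primes_from get_primes_from_alt
  have hc0 : 2 ≤ (max start 2).toNat := by
    have := le_max_right start 2; omega
  rw [suffA _ _ _ (fuel_okA count.toNat (max start 2).toNat (by omega))]
  by_cases h2 : (max start 2).toNat = 2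
  · by_cases hk : 0 < count
    · rw [if_pos ⟨hk, h2⟩, h2]
      obtain ⟨m, hm⟩ : ∃ m, count.toNat = m + 1 := ⟨count.toNat - 1, by omega⟩
      rw [hm, Nat.add_sub_cancel, stepA_two, loop_main m 3 (by omega) (by omega)]
      rw [suffB]
      have h1 := topB m 3 (by omega) (by omega)
      have hmono : 2 ^ m * (2 * 3 + 1) ≤ 2 ^ (m + 1) * (2 * 2 + 4) := by
        have : (2:Nat) ^ (m + 1) * (2 * 2 + 4) = 2 ^ m * 16 := by ring
        have h7 : (2:Nat) ^ m * (2 * 3 + 1) ≤ 2 ^ m * 16 := Nat.mul_le_mul_left _ (by omega)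
        omega
      rw [h2, hm] at *
      omega
    · have h0 : count.toNat = 0 := by omega
      rw [if_neg (by tauto), h0, loopA_zero]
      rw [suffB _ _ _ (by rw [stepsB, if_pos rfl]; omega), loopB_zero]
  · rw [if_neg (by tauto)]
    have h3 : 3 ≤ (max start 2).toNat := by omega
    by_cases hpar : (max start 2).toNat % 2 = 0
    · rw [if_pos hpar, skipA_even _ _ hpar (by omega),
        loop_main _ _ (by omega) (by omega)]
      rw [suffB]
      have h1 := topB count.toNat ((max start 2).toNat + 1) (by omega) (by omega)
      have hmono : 2 ^ count.toNat * (2 * ((max start 2).toNat + 1) + 1) ≤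
          2 ^ count.toNat * (2 * (max start 2).toNat + 4) :=
        Nat.mul_le_mul_left _ (by omega)
      omega
    · rw [if_neg hpar, loop_main _ _ (by omega) h3]
      rw [suffB]
      have h1 := topB count.toNat (max start 2).toNat (by omega) h3
      have hmono : 2 ^ count.toNat * (2 * (max start 2).toNat + 1) ≤
          2 ^ count.toNat * (2 * (max start 2).toNat + 4) :=
        Nat.mul_le_mul_left _ (by omega)
      omega

-- ===== VERDICT (by name: the statement is the Claim_ definition above) =====
theorem get_primes_from_spec : Claim_equal_get_primes_from := by
  intro start count _
  unfold Spec_get_primes_from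
  exact ports_agree start count
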